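-- pv_equiv track=rewrite | github.com/alexsherstinsky/agi_house_agent_skills_build_day_03142026 | llm_council_mcp/council.py | infer_artifact_type
-- ===== SOURCE A (Python) =====
-- _ARTIFACT_SIGNALS: dict[str, list[str]] = {
--     "code": [
--         "def ", "class ", "function ", "import ", "const ", "let ", "var ",
--         "return ", "if (", "for (", "while (", "try:", "except:", "catch (",
--         "public ", "private ", "package ", "func ", "fn ", "impl ",
--     ],
--     "design_doc": [
--         "## Overview", "## Requirements", "## Architecture", "## Design",
--         "## Scope", "## Assumptions", "## Constraints", "## Non-functional",
--         "## API", "## Data Model", "## System", "## Component",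
--     ],
--     "plan": [
--         "## Tasks", "## Milestones", "## Timeline", "## Sprint",
--         "## Deliverable", "## Schedule", "## Phase", "## Backlog",
--         "## Priority", "## Objective", "## Goal",
--     ],
-- }
--
-- def infer_artifact_type(artifact: str) -> str:
--     """Infer the artifact type from its content.
--
--     Counts keyword signals for each type and returns the best match.
--     Falls back to "general" if no strong signal is found.
--
--     When multiple types have signals (e.g., a design doc containing code
--     snippets), document-level types take priority: design_doc > plan > code.
--     This prevents mixed-content documents from being misclassified as code.
--     """
--     scores: dict[str, int] = {}
--     for artifact_type, signals in _ARTIFACT_SIGNALS.items():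
--         scores[artifact_type] = sum(1 for s in signals if s in artifact)
--
--     if not scores or max(scores.values()) == 0:
--         return "general"
--
--     # Document-level types take priority over code when both have signals.
--     # A design doc with code snippets is still a design doc.
--     _TYPE_PRIORITY = ["design_doc", "plan", "code"]
--     for preferred in _TYPE_PRIORITY:
--         if scores.get(preferred, 0) > 0:
--             return preferred
--
--     best = max(scores, key=scores.get)  # type: ignore[arg-type]
--     return best
-- ===== SOURCE B (Python) =====
-- _ARTIFACT_SIGNALS: dict[str, list[str]] = {
--     "code": [
--         "def ", "class ", "function ", "import ", "const ", "let ", "var ",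
--         "return ", "if (", "for (", "while (", "try:", "except:", "catch (",
--         "public ", "private ", "package ", "func ", "fn ", "impl ",
--     ],
--     "design_doc": [
--         "## Overview", "## Requirements", "## Architecture", "## Design",
--         "## Scope", "## Assumptions", "## Constraints", "## Non-functional",
--         "## API", "## Data Model", "## System", "## Component",
--     ],
--     "plan": [
--         "## Tasks", "## Milestones", "## Timeline", "## Sprint",
--         "## Deliverable", "## Schedule", "## Phase", "## Backlog",
--         "## Priority", "## Objective", "## Goal",
--     ],
-- }
--
-- # One flat (marker, type) table in priority order: design_doc, plan, code.
-- _PRIORITY_TABLE: list[tuple[str, str]] = (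
--     [(s, "design_doc") for s in _ARTIFACT_SIGNALS["design_doc"]]
--     + [(s, "plan") for s in _ARTIFACT_SIGNALS["plan"]]
--     + [(s, "code") for s in _ARTIFACT_SIGNALS["code"]]
-- )
--
--
-- def infer_artifact_type(artifact: str) -> str:
--     """Return the type of the first marker (in priority order) found in the text."""
--     for needle, artifact_type in _PRIORITY_TABLE:
--         if needle in artifact:
--             return artifact_type
--     return "general"
-- ===== Notes on version B (the rewrite author's own statement) =====
-- stated objective: simpler
-- what changed: Replaces the per-type score dict, the max-of-values test and the unreachable max-by-score fallback with one short-circuiting scan of a single flat (signal, type) table pre-ordered by priority, returning the type of the first signal present.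
import Mathlib
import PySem

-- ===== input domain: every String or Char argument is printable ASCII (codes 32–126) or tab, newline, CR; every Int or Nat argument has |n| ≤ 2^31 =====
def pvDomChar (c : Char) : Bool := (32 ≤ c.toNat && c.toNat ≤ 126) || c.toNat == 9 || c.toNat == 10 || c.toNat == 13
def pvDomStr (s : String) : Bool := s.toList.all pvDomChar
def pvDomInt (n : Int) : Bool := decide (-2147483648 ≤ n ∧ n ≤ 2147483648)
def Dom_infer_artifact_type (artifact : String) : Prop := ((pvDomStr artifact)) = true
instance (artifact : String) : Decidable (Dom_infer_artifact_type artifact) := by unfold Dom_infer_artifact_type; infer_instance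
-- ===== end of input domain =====

-- B replaces A's per-type signal-count dict (whose max-by-score fallback is unreachable)
-- with a short-circuiting scan of one flat priority-ordered (signal, type) table; objective: simpler.


-- ===== PORT A =====
-- the module constant _ARTIFACT_SIGNALS (a dict str -> list[str], insertion order)
def pvArtifactSignals : PySem.Dict String (List String) :=
  PySem.Dict.ofList
  [("code",
    ["def ", "class ", "function ", "import ", "const ", "let ", "var ",
     "return ", "if (", "for (", "while (", "try:", "except:", "catch (",
     "public ", "private ", "package ", "func ", "fn ", "impl "]),
   ("design_doc",
    ["## Overview", "## Requirements", "## Architecture", "## Design",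
     "## Scope", "## Assumptions", "## Constraints", "## Non-functional",
     "## API", "## Data Model", "## System", "## Component"]),
   ("plan",
    ["## Tasks", "## Milestones", "## Timeline", "## Sprint",
     "## Deliverable", "## Schedule", "## Phase", "## Backlog",
     "## Priority", "## Objective", "## Goal"])]

-- sum(1 for s in signals if s in artifact)
def pvSignalScore (artifact : String) (signals : List String) : Int :=
  signals.foldl (fun acc s => if PySem.Str.isIn s artifact then acc + 1 else acc) 0

-- the scores dict built by A's first loop
def pvScores (artifact : String) : PySem.Dict String Int :=
  (PySem.Dict.items pvArtifactSignals).foldl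
    (fun d p => PySem.Dict.insert d p.1 (pvSignalScore artifact p.2))
    PySem.Dict.empty

def infer_artifact_type (artifact : String) : String :=
  if PySem.Dict.items (pvScores artifact) = [] ∨
      PySem.List.max? (PySem.Dict.values (pvScores artifact)) (fun v => v) = some 0 then
    "general"
  else
    match ["design_doc", "plan", "code"].find?
            (fun preferred => 0 < PySem.Dict.getD (pvScores artifact) preferred 0) with
    | some preferred => preferred
    | none =>
      -- best = max(scores, key=scores.get): unreachable here, ported all the same
      (PySem.List.max? (PySem.Dict.keys (pvScores artifact)) (fun k => PySem.Dict.getD (pvScores artifact) k 0)).getD ""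

-- ===== PORT B =====
-- Source B's three signal lists (read out of _ARTIFACT_SIGNALS at module load)
def pvDesignSignals : List String :=
  ["## Overview", "## Requirements", "## Architecture", "## Design",
   "## Scope", "## Assumptions", "## Constraints", "## Non-functional",
   "## API", "## Data Model", "## System", "## Component"]
def pvPlanSignals : List String :=
  ["## Tasks", "## Milestones", "## Timeline", "## Sprint",
   "## Deliverable", "## Schedule", "## Phase", "## Backlog",
   "## Priority", "## Objective", "## Goal"]
def pvCodeSignals : List String :=
  ["def ", "class ", "function ", "import ", "const ", "let ", "var ",
   "return ", "if (", "for (", "while (", "try:", "except:", "catch (",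
   "public ", "private ", "package ", "func ", "fn ", "impl "]

-- _PRIORITY_TABLE: all design_doc pairs, then plan pairs, then code pairs
def pvPriorityTable : List (String × String) :=
  (pvDesignSignals.map (fun s => (s, "design_doc")))
    ++ (pvPlanSignals.map (fun s => (s, "plan")))
    ++ (pvCodeSignals.map (fun s => (s, "code")))

-- the for-loop of Source B: return the type of the first signal found, else "general"
def pvScanTable (table : List (String × String)) (artifact : String) : String :=
  match table with
  | [] => "general"
  | (s, t) :: rest => if PySem.Str.isIn s artifact then t else pvScanTable rest artifact

def infer_artifact_type_alt (artifact : String) : String :=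
  pvScanTable pvPriorityTable artifact

-- ===== PRECONDITION & SPEC =====
def Spec_infer_artifact_type (artifact : String) (out : String) : Prop := out = infer_artifact_type_alt artifact
instance (artifact : String) (out : String) : Decidable (Spec_infer_artifact_type artifact out) := by unfold Spec_infer_artifact_type; infer_instance

-- ===== CLAIM (what is proved, stated in full; the proofs are below) =====
def Claim_equal_infer_artifact_type : Prop := ∀ (artifact : String), Dom_infer_artifact_type artifact → Spec_infer_artifact_type artifact (infer_artifact_type artifact)

-- ===== LEMMAS AND PROOFS =====

-- scanning a block of pairs all tagged t, then the rest
theorem pvScanTable_map_append (signals : List String) (t : String)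
    (rest : List (String × String)) (artifact : String) :
    pvScanTable ((signals.map (fun s => (s, t))) ++ rest) artifact =
      if signals.any (fun s => PySem.Str.isIn s artifact) then t
      else pvScanTable rest artifact := by
  induction signals with
  | nil => simp
  | cons s ss ih =>
    simp only [List.map_cons, List.cons_append, pvScanTable, List.any_cons]
    by_cases h : PySem.Str.isIn s artifact = true
    · simp only [PySem.Str.isIn_eq] at h
      simp [h]
    · simp only [PySem.Str.isIn_eq] at h
      simp [h, ih]

-- B evaluated: the nested presence test in priority order
theorem alt_eq_if (artifact : String) :
    infer_artifact_type_alt artifact =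
      if pvDesignSignals.any (fun s => PySem.Str.isIn s artifact) then "design_doc"
      else if pvPlanSignals.any (fun s => PySem.Str.isIn s artifact) then "plan"
      else if pvCodeSignals.any (fun s => PySem.Str.isIn s artifact) then "code"
      else "general" := by
  unfold infer_artifact_type_alt pvPriorityTable
  rw [List.append_assoc, pvScanTable_map_append, pvScanTable_map_append]
  have h0 : pvCodeSignals.map (fun s => (s, "code")) =
      pvCodeSignals.map (fun s => (s, "code")) ++ [] := by simp
  rw [h0, pvScanTable_map_append]
  simp [pvScanTable]

-- the score of a signal list is its countP; hence nonneg, zero/positive according to `any`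
theorem pvSignalScore_eq_countP (artifact : String) (l : List String) :
    pvSignalScore artifact l = (l.countP (fun s => PySem.Str.isIn s artifact) : Int) := by
  unfold pvSignalScore
  rw [PySem.List.foldl_if_add_one]; ring

theorem pvSignalScore_nonneg (artifact : String) (l : List String) :
    0 ≤ pvSignalScore artifact l := by
  rw [pvSignalScore_eq_countP]; positivity

theorem pvSignalScore_pos_of_any (artifact : String) (l : List String)
    (h : l.any (fun s => PySem.Str.isIn s artifact) = true) :
    0 < pvSignalScore artifact l := by
  rw [pvSignalScore_eq_countP]
  norm_cast
  rw [List.countP_pos_iff]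
  exact (List.any_eq_true).1 h

theorem pvSignalScore_eq_zero_of_not_any (artifact : String) (l : List String)
    (h : l.any (fun s => PySem.Str.isIn s artifact) = false) :
    pvSignalScore artifact l = 0 := by
  rw [pvSignalScore_eq_countP]
  norm_cast
  rw [List.countP_eq_zero]
  intro s hs
  exact (List.any_eq_false.mp h) s hs

-- A's first loop, evaluated: one entry per artifact type, in insertion order
theorem pvScores_eq (artifact : String) :
    pvScores artifact = PySem.Dict.mk
      [("code", pvSignalScore artifact pvCodeSignals),
       ("design_doc", pvSignalScore artifact pvDesignSignals),
       ("plan", pvSignalScore artifact pvPlanSignals)] := by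
  apply PySem.Dict.ext
  simp [pvScores, pvArtifactSignals, pvCodeSignals, pvDesignSignals, pvPlanSignals,
        PySem.Dict.ofList, PySem.Dict.insert, PySem.Dict.empty,
        PySem.Dict.update, PySem.Dict.contains, List.foldl]

theorem pvGetD_mk_cons {v : Type} (k x : String) (val : v) (rest : List (String × v)) (dflt : v) :
    PySem.Dict.getD (PySem.Dict.mk ((k, val) :: rest)) x dflt =
      if k == x then val else PySem.Dict.getD (PySem.Dict.mk rest) x dflt := by
  simp only [PySem.Dict.getD, PySem.Dict.get?_mk_cons]
  split <;> simp

-- ===== VERDICT (by name: the statement is the Claim_ definition above) =====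
theorem infer_artifact_type_spec : Claim_equal_infer_artifact_type := by
  intro artifact _
  unfold Spec_infer_artifact_type
  rw [alt_eq_if]
  unfold infer_artifact_type
  rw [pvScores_eq]
  have nC := pvSignalScore_nonneg artifact pvCodeSignals
  have nP := pvSignalScore_nonneg artifact pvPlanSignals
  have nD := pvSignalScore_nonneg artifact pvDesignSignals
  cases hD : pvDesignSignals.any (fun s => PySem.Str.isIn s artifact) <;>
  cases hP : pvPlanSignals.any (fun s => PySem.Str.isIn s artifact) <;>
  cases hC : pvCodeSignals.any (fun s => PySem.Str.isIn s artifact)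
  case false.false.false =>
    have zD := pvSignalScore_eq_zero_of_not_any artifact _ hD
    have zP := pvSignalScore_eq_zero_of_not_any artifact _ hP
    have zC := pvSignalScore_eq_zero_of_not_any artifact _ hC
    simp [PySem.Dict.values, PySem.List.max?, List.foldl, zD, zP, zC]
  case false.false.true =>
    have zD := pvSignalScore_eq_zero_of_not_any artifact _ hD
    have zP := pvSignalScore_eq_zero_of_not_any artifact _ hP
    have pC := pvSignalScore_pos_of_any artifact _ hC
    simp only [PySem.Dict.values, List.map, PySem.List.max?_id_cons, List.foldl]
    rw [if_neg]
    · simp [List.find?, pvGetD_mk_cons, zD, zP, pC]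
    · rintro (h | h)
      · simp at h
      · have hm : 0 < max (max (pvSignalScore artifact pvCodeSignals)
            (pvSignalScore artifact pvDesignSignals))
            (pvSignalScore artifact pvPlanSignals) :=
          lt_of_lt_of_le pC (le_trans (le_max_left _ _) (le_max_left _ _))
        simp only [Option.some.injEq] at h
        omega
  case false.true.false | false.true.true =>
    have zD := pvSignalScore_eq_zero_of_not_any artifact _ hD
    have pP := pvSignalScore_pos_of_any artifact _ hP
    simp only [PySem.Dict.values, List.map, PySem.List.max?_id_cons, List.foldl]
    rw [if_neg]
    · simp [List.find?, pvGetD_mk_cons, zD, pP]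
    · rintro (h | h)
      · simp at h
      · have hm : 0 < max (max (pvSignalScore artifact pvCodeSignals)
            (pvSignalScore artifact pvDesignSignals))
            (pvSignalScore artifact pvPlanSignals) :=
          lt_of_lt_of_le pP (le_max_right _ _)
        simp only [Option.some.injEq] at h
        omega
  all_goals
    (have pD := pvSignalScore_pos_of_any artifact _ hD
     simp only [PySem.Dict.values, List.map, PySem.List.max?_id_cons, List.foldl]
     rw [if_neg]
     · simp [List.find?, pvGetD_mk_cons, pD]
     · rintro (h | h)
       · simp at h
       · have hm : 0 < max (max (pvSignalScore artifact pvCodeSignals)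
             (pvSignalScore artifact pvDesignSignals))
             (pvSignalScore artifact pvPlanSignals) :=
           lt_of_lt_of_le pD (le_trans (le_max_right _ _) (le_max_left _ _))
         simp only [Option.some.injEq] at h
         omega)
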